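-- pv_equiv track=rewrite | github.com/ZJRen9/m6A_peak_quanlity_evaluate2 | bin/m6A_peak_relative_position_to_transcript.py | overlap_transcript
-- ===== SOURCE A (Python) =====
-- def overlap_transcript(chrom,start,end,exon_start_list,exon_end_list):
-- 	chromStart = start + (end - start)//2
-- 	chromEnd = chromStart + 1
-- 	for i in range(len(exon_start_list)):
-- 		exon_start = exon_start_list[i]
-- 		exon_end = exon_end_list[i]
-- 		if chromStart < exon_end and chromStart >= exon_start:
-- 			return True
-- 		else:
-- 			pass
-- 	return False
-- ===== SOURCE B (Python) =====
-- def overlap_transcript(chrom, start, end, exon_start_list, exon_end_list):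
--     # Sort exons by start, then scan the sorted list keeping a running maximum
--     # end among exons whose start <= midpoint; stop as soon as a start exceeds
--     # the midpoint (all later starts are larger).  The midpoint is covered iff
--     # that running maximum exceeds it.
--     m = start + (end - start) // 2
--     best = m
--     for s, e in sorted(zip(exon_start_list, exon_end_list), key=lambda p: p[0]):
--         if s > m:
--             break
--         if e > best:
--             best = e
--     return best > m
-- ===== Notes on version B (the rewrite author's own statement) =====
-- stated objective: alternative
-- what changed: Instead of A's linear scan of the given exon order testing both bounds per exon with early return, B sorts the exon pairs by start, scans the sorted prefix of exons whose start <= midpoint maintaining only a running maximum end (breaking at the first larger start), and answers by comparing that maximum with the midpoint; correct because the midpoint lies in some exon iff the maximum end among exons starting at or before it exceeds it.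
import Mathlib
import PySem

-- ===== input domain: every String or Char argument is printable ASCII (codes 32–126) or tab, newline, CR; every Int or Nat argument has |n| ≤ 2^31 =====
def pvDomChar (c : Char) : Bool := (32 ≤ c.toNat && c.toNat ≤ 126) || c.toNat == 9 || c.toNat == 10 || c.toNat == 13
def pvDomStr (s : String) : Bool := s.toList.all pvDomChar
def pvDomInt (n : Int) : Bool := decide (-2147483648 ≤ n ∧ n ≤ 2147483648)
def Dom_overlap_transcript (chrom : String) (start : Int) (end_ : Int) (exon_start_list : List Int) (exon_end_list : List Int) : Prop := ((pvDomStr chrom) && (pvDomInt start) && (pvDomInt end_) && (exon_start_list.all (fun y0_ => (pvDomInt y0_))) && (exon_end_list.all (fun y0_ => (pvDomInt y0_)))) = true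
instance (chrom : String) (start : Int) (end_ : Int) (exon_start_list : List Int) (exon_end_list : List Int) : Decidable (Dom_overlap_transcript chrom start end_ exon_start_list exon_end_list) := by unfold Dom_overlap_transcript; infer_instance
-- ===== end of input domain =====

-- B sorts the exon pairs by start and scans the sorted prefix (start ≤ midpoint) keeping a running max end; alternative algorithm, not faster.
-- Pre_ excludes inputs where exon_start_list is longer than exon_end_list (A raises IndexError there unless an earlier exon matched).


-- ===== PORT A =====
-- the 'for i in range(len(exon_start_list))' loop; 'none' from pyGet? is Python's IndexError (excluded by Pre_)
def overlapGoA (chromStart : Int) (exon_start_list exon_end_list : List Int) (i : Nat) : Bool :=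
  if _h : i < exon_start_list.length then
    match PySem.List.pyGet? exon_start_list (i : Int), PySem.List.pyGet? exon_end_list (i : Int) with
    | some exon_start, some exon_end =>
        if chromStart < exon_end ∧ chromStart ≥ exon_start then true
        else overlapGoA chromStart exon_start_list exon_end_list (i + 1)
    | _, _ => false
  else false
termination_by exon_start_list.length - i

def overlap_transcript (chrom : String) (start : Int) (end_ : Int) (exon_start_list : List Int) (exon_end_list : List Int) : Bool :=
  let chromStart := start + PySem.Int.floordiv (end_ - start) 2
  let _chromEnd := chromStart + 1
  overlapGoA chromStart exon_start_list exon_end_list 0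

-- ===== PORT B =====
-- the 'for s, e in sorted(...)' loop with break; best is the running maximum end
def overlapGoB (m : Int) : List (Int × Int) → Int → Int
  | [], best => best
  | (s, e) :: rest, best =>
      if s > m then best
      else overlapGoB m rest (if e > best then e else best)

def overlap_transcript_alt (chrom : String) (start : Int) (end_ : Int) (exon_start_list : List Int) (exon_end_list : List Int) : Bool :=
  let m := start + PySem.Int.floordiv (end_ - start) 2
  let ps := PySem.List.sorted (exon_start_list.zip exon_end_list) (fun p => p.1) false
  decide (overlapGoB m ps m > m)

-- ===== PRECONDITION & SPEC =====
-- Pre_ excludes exactly the inputs on which A raises IndexError: exon_start_list longer than exon_end_list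
-- and no zipped exon pair covering the midpoint (A returns normally everywhere else).
def Pre_overlap_transcript (chrom : String) (start : Int) (end_ : Int) (exon_start_list : List Int) (exon_end_list : List Int) : Prop :=
  exon_start_list.length ≤ exon_end_list.length ∨
    ∃ p ∈ exon_start_list.zip exon_end_list,
      p.1 ≤ start + PySem.Int.floordiv (end_ - start) 2 ∧
      start + PySem.Int.floordiv (end_ - start) 2 < p.2
instance (chrom : String) (start : Int) (end_ : Int) (exon_start_list : List Int) (exon_end_list : List Int) : Decidable (Pre_overlap_transcript chrom start end_ exon_start_list exon_end_list) := by unfold Pre_overlap_transcript; infer_instance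

def pvWitness_overlap_transcript : String × Int × Int × List Int × List Int := ("chr1", 0, 10, [0, 8], [4, 12])

def Spec_overlap_transcript (chrom : String) (start : Int) (end_ : Int) (exon_start_list : List Int) (exon_end_list : List Int) (out : Bool) : Prop := out = overlap_transcript_alt chrom start end_ exon_start_list exon_end_list
instance (chrom : String) (start : Int) (end_ : Int) (exon_start_list : List Int) (exon_end_list : List Int) (out : Bool) : Decidable (Spec_overlap_transcript chrom start end_ exon_start_list exon_end_list out) := by unfold Spec_overlap_transcript; infer_instance

-- ===== CLAIM (what is proved, stated in full; the proofs are below) =====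
def Claim_equal_overlap_transcript : Prop := ∀ (chrom : String) (start : Int) (end_ : Int) (exon_start_list : List Int) (exon_end_list : List Int), Dom_overlap_transcript chrom start end_ exon_start_list exon_end_list → Pre_overlap_transcript chrom start end_ exon_start_list exon_end_list → Spec_overlap_transcript chrom start end_ exon_start_list exon_end_list (overlap_transcript chrom start end_ exon_start_list exon_end_list)

-- ===== LEMMAS AND PROOFS =====
-- A's scan equals an existence test over the zipped pairs
lemma overlapGoA_eq_any (m : Int) : ∀ (n : Nat) (ss es : List Int) (i : Nat),
    ss.length ≤ es.length → ss.length - i ≤ n →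
    overlapGoA m ss es i = ((ss.drop i).zip (es.drop i)).any (fun p => decide (p.1 ≤ m ∧ m < p.2)) := by
  intro n
  induction n with
  | zero =>
    intro ss es i hle hn
    have hi : ss.length ≤ i := by omega
    rw [overlapGoA]
    simp [Nat.not_lt.mpr hi, List.drop_eq_nil_of_le hi]
  | succ n ih =>
    intro ss es i hle hn
    by_cases hi : i < ss.length
    · have hie : i < es.length := by omega
      rw [overlapGoA]
      rw [dif_pos hi]
      rw [PySem.List.pyGet?_natCast, PySem.List.pyGet?_natCast,
          List.getElem?_eq_getElem hi, List.getElem?_eq_getElem hie]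
      rw [List.drop_eq_getElem_cons hi, List.drop_eq_getElem_cons hie]
      simp only [List.zip_cons_cons, List.any_cons]
      rw [ih ss es (i + 1) hle (by omega)]
      by_cases hc : m < es[i] ∧ m ≥ ss[i]
      · rw [if_pos hc]
        have : (decide (ss[i] ≤ m ∧ m < es[i])) = true := by simp; omega
        simp [this]
      · rw [if_neg hc]
        have : (decide (ss[i] ≤ m ∧ m < es[i])) = false := by
          simp only [decide_eq_false_iff_not]; omega
        simp [this]
    · have hi' : ss.length ≤ i := by omega
      rw [overlapGoA]
      simp [Nat.not_lt.mpr hi', List.drop_eq_nil_of_le hi']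

-- if some zipped pair covers m, A's scan returns True before any index can overflow
lemma overlapGoA_true (m : Int) : ∀ (n : Nat) (ss es : List Int) (i : Nat),
    ss.length - i ≤ n →
    ((ss.drop i).zip (es.drop i)).any (fun p => decide (p.1 ≤ m ∧ m < p.2)) = true →
    overlapGoA m ss es i = true := by
  intro n
  induction n with
  | zero =>
    intro ss es i hn hany
    have hi : ss.length ≤ i := by omega
    simp [List.drop_eq_nil_of_le hi] at hany
  | succ n ih =>
    intro ss es i hn hany
    have hzip : ((ss.drop i).zip (es.drop i)) ≠ [] := by
      intro h; rw [h] at hany; simp at hany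
    have hi : i < ss.length := by
      by_contra h
      exact hzip (by simp [List.drop_eq_nil_of_le (Nat.le_of_not_lt h)])
    have hie : i < es.length := by
      by_contra h
      exact hzip (by simp [List.drop_eq_nil_of_le (Nat.le_of_not_lt h)])
    rw [overlapGoA, dif_pos hi]
    rw [PySem.List.pyGet?_natCast, PySem.List.pyGet?_natCast,
        List.getElem?_eq_getElem hi, List.getElem?_eq_getElem hie]
    rw [List.drop_eq_getElem_cons hi, List.drop_eq_getElem_cons hie] at hany
    simp only [List.zip_cons_cons, List.any_cons, Bool.or_eq_true] at hany
    show (if m < es[i] ∧ m ≥ ss[i] then true else overlapGoA m ss es (i + 1)) = true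
    by_cases hc : m < es[i] ∧ m ≥ ss[i]
    · rw [if_pos hc]
    · rw [if_neg hc]
      rcases hany with h | h
      · simp at h; omega
      · exact ih ss es (i + 1) (by omega) h

-- B's sorted-prefix scan exceeds m iff best already does or some listed pair covers m
lemma overlapGoB_gt (m : Int) : ∀ (l : List (Int × Int)) (best : Int),
    l.Pairwise (fun a b => a.1 ≤ b.1) →
    (overlapGoB m l best > m ↔ best > m ∨ ∃ p ∈ l, p.1 ≤ m ∧ m < p.2) := by
  intro l
  induction l with
  | nil => intro best _; simp [overlapGoB]
  | cons hd tl ih =>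
    intro best hpw
    obtain ⟨s, e⟩ := hd
    rw [List.pairwise_cons] at hpw
    obtain ⟨hhd, htl⟩ := hpw
    by_cases hs : s > m
    · rw [overlapGoB, if_pos hs]
      constructor
      · intro h; exact Or.inl h
      · rintro (h | ⟨p, hp, hp1, hp2⟩)
        · exact h
        · rcases List.mem_cons.mp hp with h | h
          · subst h; omega
          · have := hhd p h; simp at this; omega
    · rw [overlapGoB, if_neg hs]
      rw [ih _ htl]
      constructor
      · rintro (h | ⟨p, hp, hp1, hp2⟩)
        · by_cases he : e > best
          · rw [if_pos he] at h
            by_cases hbm : best > m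
            · exact Or.inl hbm
            · exact Or.inr ⟨(s, e), List.mem_cons_self, by omega, by simpa using h⟩
          · rw [if_neg he] at h; exact Or.inl h
        · exact Or.inr ⟨p, List.mem_cons_of_mem _ hp, hp1, hp2⟩
      · rintro (h | ⟨p, hp, hp1, hp2⟩)
        · left; split <;> omega
        · rcases List.mem_cons.mp hp with heq | hmem
          · subst heq
            left; split <;> omega
          · exact Or.inr ⟨p, hmem, hp1, hp2⟩

-- ===== VERDICT (by name: the statement is the Claim_ definition above) =====
theorem overlap_transcript_spec : Claim_equal_overlap_transcript := by
  intro chrom start end_ ss es _hdom hpre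
  unfold Spec_overlap_transcript overlap_transcript overlap_transcript_alt
  set m := start + PySem.Int.floordiv (end_ - start) 2 with hm
  have hpw : (PySem.List.sorted (ss.zip es) (fun p => p.1) false).Pairwise (fun a b => a.1 ≤ b.1) :=
    PySem.List.sorted_pairwise _ _
  have hB := overlapGoB_gt m (PySem.List.sorted (ss.zip es) (fun p => p.1) false) m hpw
  have hmem : ∀ p, p ∈ PySem.List.sorted (ss.zip es) (fun p => p.1) false ↔ p ∈ ss.zip es :=
    fun p => PySem.List.mem_sorted _ _ _ _
  rcases hpre with hlen | ⟨p, hp, h1, h2⟩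
  · have hA := overlapGoA_eq_any m ss.length ss es 0 hlen (by omega)
    simp only [List.drop_zero] at hA
    simp only [hA]
    rw [Bool.eq_iff_iff]
    simp only [List.any_eq_true, decide_eq_true_eq]
    constructor
    · rintro ⟨q, hq, hq1, hq2⟩
      exact hB.mpr (Or.inr ⟨q, (hmem q).mpr hq, hq1, hq2⟩)
    · intro h
      rcases hB.mp h with h' | ⟨q, hq, hq1, hq2⟩
      · omega
      · exact ⟨q, (hmem q).mp hq, hq1, hq2⟩
  · have hany : ((ss.drop 0).zip (es.drop 0)).any (fun q => decide (q.1 ≤ m ∧ m < q.2)) = true := by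
      simp only [List.drop_zero, List.any_eq_true, decide_eq_true_eq]
      exact ⟨p, hp, h1, h2⟩
    have hA := overlapGoA_true m ss.length ss es 0 (by omega) hany
    rw [hA]
    symm
    rw [decide_eq_true_iff]
    exact hB.mpr (Or.inr ⟨p, (hmem p).mpr hp, h1, h2⟩)
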